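-- pv_equiv track=rewrite | github.com/AnHongIl/Practice_Algorithms | Algorithm/KaKao/2017_blind/1st_secret_map.py | combineMaps
-- ===== SOURCE A (Python) =====
-- def combineMaps(n, arr1, arr2):
--     ret = []
--     for row1, row2 in zip(arr1, arr2):
--         row = ""
--         for c1, c2 in zip(row1, row2):
--             if c1 is '#' or c2 is '#':
--                 row += '#'
--             else:
--                 row += ' '
--         ret.append(row)
--     return ret
-- ===== SOURCE B (Python) =====
-- def combineMaps(n, arr1, arr2):
--     ret = []
--     for row1, row2 in zip(arr1, arr2):
--         w = min(len(row1), len(row2))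
--         v1 = 0
--         for c in row1[:w]:
--             v1 = v1 * 2 + (1 if c == '#' else 0)
--         v2 = 0
--         for c in row2[:w]:
--             v2 = v2 * 2 + (1 if c == '#' else 0)
--         if w == 0:
--             ret.append("")
--         else:
--             ret.append(format(v1 | v2, '0%db' % w).translate(str.maketrans('10', '# ')))
--     return ret
-- ===== Notes on version B (the rewrite author's own statement) =====
-- stated objective: alternative
-- what changed: Each output row is computed arithmetically: both rows are encoded as bitmask integers (bit = 1 iff '#'), OR-ed, and the result is rendered as a fixed-width binary string translated to '#'/' ', instead of branching per character pair.
import Mathlib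
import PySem

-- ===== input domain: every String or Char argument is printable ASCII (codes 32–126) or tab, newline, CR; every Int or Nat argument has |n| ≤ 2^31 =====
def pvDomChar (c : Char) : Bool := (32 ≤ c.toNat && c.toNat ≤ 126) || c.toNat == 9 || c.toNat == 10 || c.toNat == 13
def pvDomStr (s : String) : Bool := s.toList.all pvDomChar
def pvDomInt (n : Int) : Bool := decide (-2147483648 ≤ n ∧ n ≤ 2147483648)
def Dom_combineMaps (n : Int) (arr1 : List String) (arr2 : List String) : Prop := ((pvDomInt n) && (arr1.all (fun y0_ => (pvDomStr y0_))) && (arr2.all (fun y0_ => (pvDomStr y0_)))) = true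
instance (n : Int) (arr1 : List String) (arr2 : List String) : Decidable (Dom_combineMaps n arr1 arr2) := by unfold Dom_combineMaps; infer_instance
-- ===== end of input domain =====

-- B renders each row as the OR of two bitmask integers formatted as a fixed-width binary
-- string, instead of A's per-character-pair branching; objective: alternative (same cost).
-- On the ASCII domain A's `c is '#'` coincides with `c == '#'` (CPython interns 1-char strings).

-- ===== PORT A =====
-- the row accumulated by `row += …` is kept as a List Char and packed by String.mk at append time
def combineMaps (n : Int) (arr1 : List String) (arr2 : List String) : List String :=
  (arr1.zip arr2).foldl
    (fun ret rr =>
      ret ++ [String.mk ((rr.1.toList.zip rr.2.toList).foldl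
        (fun row cc => row ++ [if cc.1 = '#' ∨ cc.2 = '#' then '#' else ' ']) [])])
    []

-- ===== PORT B =====
-- v = v*2 + (1 if c == '#' else 0) over the first w characters of a row
def pvRowVal (l : List Char) : Nat :=
  l.foldl (fun a c => 2 * a + (if c = '#' then 1 else 0)) 0

-- binary digits of v > 0, most significant first, no leading zeros (format(v, 'b'))
def pvBinAux : Nat → List Char
  | 0 => []
  | v + 1 => pvBinAux ((v + 1) / 2) ++ [if (v + 1) % 2 = 1 then '1' else '0']
  decreasing_by exact Nat.div_lt_self (Nat.succ_pos v) one_lt_two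

-- format(v, 'b') ('0' for v = 0)
def pvBinStr (v : Nat) : List Char := if v = 0 then ['0'] else pvBinAux v

-- the zero-padding of format(v, '0wb')
def pvPad (w : Nat) (s : List Char) : List Char := List.replicate (w - s.length) '0' ++ s

-- str.translate(str.maketrans('10', '# '))
def pvTr (c : Char) : Char := if c = '1' then '#' else if c = '0' then ' ' else c

def combineMaps_alt (n : Int) (arr1 : List String) (arr2 : List String) : List String :=
  (arr1.zip arr2).foldl
    (fun ret rr =>
      let w := min rr.1.toList.length rr.2.toList.length
      let v1 := pvRowVal (rr.1.toList.take w)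
      let v2 := pvRowVal (rr.2.toList.take w)
      ret ++ [if w = 0 then "" else String.mk ((pvPad w (pvBinStr (v1 ||| v2))).map pvTr)])
    []

-- ===== PRECONDITION & SPEC =====
def Spec_combineMaps (n : Int) (arr1 : List String) (arr2 : List String) (out : List String) : Prop := out = combineMaps_alt n arr1 arr2
instance (n : Int) (arr1 : List String) (arr2 : List String) (out : List String) : Decidable (Spec_combineMaps n arr1 arr2 out) := by unfold Spec_combineMaps; infer_instance

-- ===== CLAIM (what is proved, stated in full; the proofs are below) =====
def Claim_equal_combineMaps : Prop := ∀ (n : Int) (arr1 : List String) (arr2 : List String), Dom_combineMaps n arr1 arr2 → Spec_combineMaps n arr1 arr2 (combineMaps n arr1 arr2)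

-- ===== LEMMAS AND PROOFS =====

-- the bits of v, most significant first, exactly w of them
def pvBitsW : Nat → Nat → List Char
  | 0, _ => []
  | w + 1, v => pvBitsW w (v / 2) ++ [if v % 2 = 1 then '1' else '0']

lemma pvBitsW_zero (w : Nat) : pvBitsW w 0 = List.replicate w '0' := by
  induction w with
  | zero => rfl
  | succ w ih => simp [pvBitsW, ih, List.replicate_succ']

lemma pvPad_binStr (w : Nat) : ∀ v, v < 2 ^ (w + 1) →
    pvPad (w + 1) (pvBinStr v) = pvBitsW (w + 1) v := by
  induction w with
  | zero =>
    intro v hv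
    interval_cases v <;> simp [pvPad, pvBinStr, pvBinAux, pvBitsW]
  | succ w ih =>
    intro v hv
    by_cases h2 : v < 2
    · interval_cases v <;>
        simp [pvPad, pvBinStr, pvBinAux, pvBitsW, pvBitsW_zero, List.replicate_succ']
    · have hv0 : v ≠ 0 := by omega
      have hstep : pvBinStr v = pvBinStr (v / 2) ++ [if v % 2 = 1 then '1' else '0'] := by
        have hd0 : v / 2 ≠ 0 := by omega
        obtain ⟨u, rfl⟩ : ∃ u, v = u + 1 := ⟨v - 1, by omega⟩
        simp [pvBinStr, hd0, pvBinAux]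
      have hdiv : v / 2 < 2 ^ (w + 1) := by
        have := hv; rw [pow_succ] at this; omega
      have hih := ih (v / 2) hdiv
      rw [hstep]
      show pvPad (w + 1 + 1) _ = pvBitsW (w + 1) (v / 2) ++ [if v % 2 = 1 then '1' else '0']
      rw [← hih]
      simp only [pvPad, List.length_append, List.length_singleton, ← List.append_assoc]
      have : w + 1 + 1 - ((pvBinStr (v / 2)).length + 1) = w + 1 - (pvBinStr (v / 2)).length := by omega
      rw [this]

lemma pvRowVal_append (l : List Char) (c : Char) :
    pvRowVal (l ++ [c]) = 2 * pvRowVal l + (if c = '#' then 1 else 0) := by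
  simp [pvRowVal, List.foldl_append]

lemma pvRowVal_lt (l : List Char) : pvRowVal l < 2 ^ l.length := by
  induction l using List.reverseRecOn with
  | nil => simp [pvRowVal]
  | append_singleton l c ih =>
    rw [pvRowVal_append]
    simp only [List.length_append, List.length_singleton, pow_succ]
    split_ifs <;> omega

lemma pvLorStep (a b x y : Nat) (hx : x < 2) (hy : y < 2) :
    (2 * a + x) ||| (2 * b + y) = 2 * (a ||| b) + (x ||| y) := by
  interval_cases x <;> interval_cases y
  · simpa [Nat.bit, mul_comm] using Nat.lor_bit false a false b
  · simpa [Nat.bit, mul_comm] using Nat.lor_bit false a true b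
  · simpa [Nat.bit, mul_comm] using Nat.lor_bit true a false b
  · simpa [Nat.bit, mul_comm] using Nat.lor_bit true a true b

-- A's inner loop as a map
def pvZipRow (l1 l2 : List Char) : List Char :=
  (l1.zip l2).map (fun cc => if cc.1 = '#' ∨ cc.2 = '#' then '#' else ' ')

lemma pvFoldlApp {α β : Type} (f : α → β) (p : List α) (acc : List β) :
    p.foldl (fun r x => r ++ [f x]) acc = acc ++ p.map f := by
  induction p generalizing acc with
  | nil => simp
  | cons x xs ih => simp [ih]

lemma pvOrLtTwo (x y : Nat) (hx : x < 2) (hy : y < 2) : x ||| y < 2 :=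
  Nat.or_lt_two_pow (n := 1) hx hy

lemma pvRowEq (l1 : List Char) : ∀ l2 : List Char, l1.length = l2.length →
    (pvBitsW l1.length (pvRowVal l1 ||| pvRowVal l2)).map pvTr = pvZipRow l1 l2 := by
  induction l1 using List.reverseRecOn with
  | nil =>
    intro l2 h
    have : l2 = [] := by simpa using (List.length_eq_zero_iff.mp h.symm)
    subst this; simp [pvBitsW, pvRowVal, pvZipRow]
  | append_singleton a c1 ih =>
    intro l2 h
    induction l2 using List.reverseRecOn with
    | nil => simp at h
    | append_singleton b c2 _ =>
      have hlen : a.length = b.length := by simpa using h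
      set x := (if c1 = '#' then 1 else 0 : Nat) with hxdef
      set y := (if c2 = '#' then 1 else 0 : Nat) with hydef
      have hx : x < 2 := by rw [hxdef]; split_ifs <;> omega
      have hy : y < 2 := by rw [hydef]; split_ifs <;> omega
      have hz : x ||| y < 2 := pvOrLtTwo x y hx hy
      have hval : pvRowVal (a ++ [c1]) ||| pvRowVal (b ++ [c2])
          = 2 * (pvRowVal a ||| pvRowVal b) + (x ||| y) := by
        rw [pvRowVal_append, pvRowVal_append, ← hxdef, ← hydef,
          pvLorStep _ _ _ _ hx hy]
      have hdiv : (2 * (pvRowVal a ||| pvRowVal b) + (x ||| y)) / 2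
          = pvRowVal a ||| pvRowVal b := by omega
      have hmod : (2 * (pvRowVal a ||| pvRowVal b) + (x ||| y)) % 2 = x ||| y := by
        omega
      have hlen1 : (a ++ [c1]).length = a.length + 1 := by simp
      rw [hval, hlen1]
      show (pvBitsW (a.length + 1) _).map pvTr = _
      rw [show pvBitsW (a.length + 1) (2 * (pvRowVal a ||| pvRowVal b) + (x ||| y))
          = pvBitsW a.length ((2 * (pvRowVal a ||| pvRowVal b) + (x ||| y)) / 2)
            ++ [if (2 * (pvRowVal a ||| pvRowVal b) + (x ||| y)) % 2 = 1 then '1' else '0']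
          from rfl, hdiv, hmod]
      rw [List.map_append, ih b hlen]
      have hzip : pvZipRow (a ++ [c1]) (b ++ [c2])
          = pvZipRow a b ++ [if c1 = '#' ∨ c2 = '#' then '#' else ' '] := by
        simp [pvZipRow, List.zip_append hlen]
      rw [hzip]
      congr 1
      by_cases h1 : c1 = '#' <;> by_cases h2 : c2 = '#' <;>
        simp [hxdef, hydef, h1, h2, pvTr]

lemma pvRowString (s1 s2 : String) :
    String.mk ((s1.toList.zip s2.toList).foldl
        (fun row cc => row ++ [if cc.1 = '#' ∨ cc.2 = '#' then '#' else ' ']) [])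
      = (if min s1.toList.length s2.toList.length = 0 then "" else
          String.mk ((pvPad (min s1.toList.length s2.toList.length)
            (pvBinStr (pvRowVal (s1.toList.take (min s1.toList.length s2.toList.length))
              ||| pvRowVal (s2.toList.take (min s1.toList.length s2.toList.length))))).map pvTr)) := by
  set l1 := s1.toList
  set l2 := s2.toList
  set w := min l1.length l2.length with hw
  rw [pvFoldlApp]
  show String.mk (pvZipRow l1 l2) = _
  have hzipt : pvZipRow l1 l2 = pvZipRow (l1.take w) (l2.take w) := by
    rw [pvZipRow, pvZipRow, List.zip_eq_zip_take_min]
  rcases Nat.eq_zero_or_pos w with h0 | hpos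
  · rw [if_pos h0]
    rw [hzipt, h0]
    rfl
  · rw [if_neg (by omega)]
    have hlt1 : (l1.take w).length = w := by
      simp [List.length_take]; omega
    have hlt2 : (l2.take w).length = w := by
      simp [List.length_take]; omega
    obtain ⟨k, hk⟩ : ∃ k, w = k + 1 := ⟨w - 1, by omega⟩
    have hv : pvRowVal (l1.take w) ||| pvRowVal (l2.take w) < 2 ^ w := by
      apply Nat.or_lt_two_pow
      · have := pvRowVal_lt (l1.take w); rwa [hlt1] at this
      · have := pvRowVal_lt (l2.take w); rwa [hlt2] at this
    rw [hk] at hv ⊢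
    rw [pvPad_binStr _ _ hv]
    rw [hzipt, ← pvRowEq (l1.take w) (l2.take w) (hlt1.trans hlt2.symm)]
    rw [hlt1, hk]

-- ===== VERDICT (by name: the statement is the Claim_ definition above) =====
theorem combineMaps_spec : Claim_equal_combineMaps := by
  intro n arr1 arr2 _
  show combineMaps n arr1 arr2 = combineMaps_alt n arr1 arr2
  unfold combineMaps combineMaps_alt
  rw [pvFoldlApp (fun rr : String × String => String.mk ((rr.1.toList.zip rr.2.toList).foldl
        (fun row cc => row ++ [if cc.1 = '#' ∨ cc.2 = '#' then '#' else ' ']) [])),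
      pvFoldlApp (fun rr : String × String =>
        if min rr.1.toList.length rr.2.toList.length = 0 then "" else
          String.mk ((pvPad (min rr.1.toList.length rr.2.toList.length)
            (pvBinStr (pvRowVal (rr.1.toList.take (min rr.1.toList.length rr.2.toList.length))
              ||| pvRowVal (rr.2.toList.take (min rr.1.toList.length rr.2.toList.length))))).map pvTr))]
  simp only [List.nil_append]
  exact List.map_congr_left fun rr _ => pvRowString rr.1 rr.2
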